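/- GENERATED by tools/from_farm_form.py from farm/worked/malloc/Proof.lean (a worked proof of the farm's unit `malloc`,
   accepted by the verdict) — do not edit. -/
import ProgX.Base.Spec.Units.malloc

open X86 X86.User Asan ProgX.Base

set_option maxRecDepth 4000
set_option maxHeartbeats 4000000

/-- `malloc` (c/base/heap.c; 0x103200 in the base image, 10 instructions) satisfies `ProgX.Base.Spec.malloc.spec`, given the contract of `heap_alloc`:
the size test, the rounding `lea rsi, [rdi + 15] ; and rsi, -16`, the call.
(Carried over from agent GA's proof against its test image, c/heap/heaptest.elf: tools/port_heap_units.py.) -/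
theorem ProgX.Base.Spec.Proved.malloc_ok : ProgX.Base.Spec.malloc.Statement := by
  intro Lay hLay μ hμ u₀ hcode h_heap_alloc H rest frames u ret he hpre
  have halloc := h_heap_alloc H rest frames
  v_entry he
  have hok := hpre.inv.heap
  have hbase := hpre.base
  have hlimit := hpre.limit
  have hroom := hok.room
  rw [hbase, hlimit] at hroom
  u_walk hcode [hμ.vendor] span [ProgX.Base.L.textLo, ProgX.Base.L.textHi] side (v_side)
  case call_inv =>
    v_inv
  case pre_103215 =>
    -- the precondition of `heap_alloc(n, r16 n)`: the heap's invariant under the lower stack pointer; the capacity is `r16 n`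
    have hc : (s_103215.reg .rsi).toNat = r16 (u.reg .rdi).toNat := by
      rw [w_rsi]
      exact ProgX.Spec.r16_word _ (by omega)
    have hrdi : s_103215.reg .rdi = u.reg .rdi := w_kept.get .rdi (by rfl)
    have hlt := r16_lt (u.reg .rdi).toNat
    have hun : ShadowUntouched u.mem s_103215.mem := by v_untouched
    have hsame : Mem.EqOn H.base H.limit u.mem s_103215.mem := by
      rw [hbase, hlimit]
      u_memnorm
      u_eqon
    have hsp := hpre.inv.shadow.stack.lo
    refine ⟨⟨?_, hpre.base, hpre.limit, hpre.text, hpre.offText⟩, ?_, ?_, ?_⟩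
    · refine (hpre.inv.eqOn hun hsame).lower ?_ ?_ ?_
      · rw [w_rsp]
        u_omega
      · rw [w_rsp]
        u_omega
      · rw [w_rsp]
        u_omega
    · rw [hc, hrdi]
      exact Nat.le_refl _
    · rw [hc]
      exact r16_mod _
    · rw [hc]
      omega
  case cont =>
    -- `n > ROOM`: NULL without a call; such a request does not fit
    have hnf : ¬ H.Fits (r16 (u.reg .rdi).toNat) := by
      have hle := le_r16 (u.reg .rdi).toNat
      unfold Heap.Fits
      rw [hbase, hlimit]
      omega
    refine ReachVia.done ?_
    v_returned
    refine ⟨fun hfit => absurd hfit hnf, fun _ => ⟨?_, ?_, ?_, ?_⟩⟩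
    · rw [w_rax]
      rfl
    · rw [w_mem]
      exact hpre.inv
    · rw [w_mem]
      exact Mem.EqOn.refl _ _ _
    · rw [w_mem]
      exact Mem.SameExcept.refl _ _
  case cont =>
    -- after `heap_alloc`: `add rsp, 8 ; ret`
    have hc : (s_103215.reg .rsi).toNat = r16 (u.reg .rdi).toNat := by
      rw [w_rsi_103215]
      exact ProgX.Spec.r16_word _ (by omega)
    have hrdi : s_103215.reg .rdi = u.reg .rdi := w_kept_103215.get .rdi (by rfl)
    have hpost : ProgX.Spec.AllocPost H rest frames 16 (u.reg .rdi).toNat (r16 (u.reg .rdi).toNat) s_103215 s_103215r := by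
      have this : ProgX.Spec.AllocPost H rest frames 16 (s_103215.reg .rdi).toNat (s_103215.reg .rsi).toNat s_103215 s_103215r := w_post
      rw [hc, hrdi] at this
      exact this
    clear w_post
    v_after_call w_rsp_103215 w_mem_103215
    simp only [shadowSpan, Heap.next_def, hbase, hrdi] at w_same
    have hs0 : UInt64.ofNat (s_103215r.mem.readLE (u.reg .rsp) 8) = ret := by
      u_frame he_retAddr
    -- the result passes through `add rsp, 8 ; ret` untouched: give it a name the walk carries along
    obtain ⟨rv, hrv⟩ : ∃ rv, s_103215r.reg .rax = rv := ⟨_, rfl⟩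
    have hactive := hpre.inv.shadow.stack.active
    have hsp := hpre.inv.shadow.stack
    u_walk hcode [hμ.vendor] span [ProgX.Base.L.textLo, ProgX.Base.L.textHi] side (v_side)
    refine ReachVia.done ?_
    v_returned
    · -- the post, from `heap_alloc`'s: the same heap, the stack pointer back at the caller's
      obtain ⟨hsucc, hfail⟩ := hpost
      have e8 : (s_103215.reg .rsp).toNat + 8 = (u.reg .rsp).toNat - 8 := by
        rw [w_rsp_103215]
        u_omega
      refine ⟨fun hfit => ?_, fun hnf => ?_⟩
      · obtain ⟨k1, k2⟩ := hsucc hfit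
        rw [hrv] at k1
        refine ⟨by rw [w_rax]; exact k1, ?_⟩
        rw [w_mem]
        rw [e8] at k2
        refine k2.raise (by omega) hsp.aligned hsp.hi ?_
        intro bF hbF
        exact (hactive bF hbF).2.2.1
      · obtain ⟨k1, k2, k3, k4⟩ := hfail hnf
        rw [hrv] at k1
        refine ⟨by rw [w_rax]; exact k1, ?_, ?_, ?_⟩
        · rw [w_mem]
          rw [e8] at k2
          refine k2.raise (by omega) hsp.aligned hsp.hi ?_
          intro bF hbF
          exact (hactive bF hbF).2.2.1
        · rw [w_mem]
          have hun : ShadowUntouched u.mem s_103215.mem := by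
            rw [w_mem_103215]
            v_untouched
          exact hun.trans k3
        · rw [w_mem]
          rw [w_rsp_103215, w_mem_103215] at k4
          u_same
    · -- the footprint
      simp only [X86.User.Spec.footprint, vspec, shadowSpan, Heap.next_def, hbase]
      u_same
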